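-- pv_equiv track=rewrite | github.com/dbwp031/AlgorithmStudy | 2025/baek_2775.py | solve
-- ===== SOURCE A (Python) =====
-- def solve(k,n):
--     board = [[0] * (n+1) for _ in range(k+1)]
--
--     # 1. 1층 세팅
--     for i in range(n+1):
--         board[0][i] = i
--
--     # 2. 각 층 세팅
--     for i in range(1, k+1):
--         for j in range(1, n+1):
--             ssum = 0
--             for line in range(1, j+1):
--                 ssum += board[i-1][line]
--             board[i][j] = ssum
--     return board[k][n]
-- ===== SOURCE B (Python) =====
-- def solve(k, n):
--     # One row updated in place by a running prefix sum: O(k*n) instead of O(k*n^2).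
--     row = list(range(n + 1))
--     for _ in range(k):
--         for j in range(1, n + 1):
--             row[j] += row[j - 1]
--     return row[n]
-- ===== Notes on version B (the rewrite author's own statement) =====
-- stated objective: faster
-- what changed: Replaces the (k+1)x(n+1) board and the inner re-summation loop by a single row updated in place with a running prefix sum (row[j] += row[j-1]).
import Mathlib
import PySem

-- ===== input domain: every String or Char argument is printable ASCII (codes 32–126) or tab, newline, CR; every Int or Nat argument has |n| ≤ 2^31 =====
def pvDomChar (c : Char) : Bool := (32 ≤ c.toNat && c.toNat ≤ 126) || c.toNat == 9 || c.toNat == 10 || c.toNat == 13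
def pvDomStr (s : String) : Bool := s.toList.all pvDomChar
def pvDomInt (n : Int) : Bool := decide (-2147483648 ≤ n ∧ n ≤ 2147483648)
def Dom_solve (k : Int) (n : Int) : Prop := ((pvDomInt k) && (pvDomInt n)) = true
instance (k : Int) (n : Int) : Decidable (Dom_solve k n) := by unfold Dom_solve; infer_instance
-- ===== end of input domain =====

-- B changes A's algorithm: one row updated in place by a running prefix sum instead of
-- re-summing the previous board row for every cell (asymptotically faster; measured by the check).

-- ===== PORT A =====
-- board[i][j] = v  (indices are nonnegative and in range on every input Pre_solve admits,
-- where .toNat and plain List.set are exact for Python's list assignment)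
def pvSet2 (b : List (List Int)) (i j : Int) (v : Int) : List (List Int) :=
  b.set i.toNat ((b.getD i.toNat []).set j.toNat v)

def solve (k : Int) (n : Int) : Int :=
  let b0 : List (List Int) :=
    (PySem.List.pyRange 0 (k+1) 1).map (fun _ => List.replicate (n+1).toNat 0)
  let b1 := (PySem.List.pyRange 0 (n+1) 1).foldl (fun b i => pvSet2 b 0 i i) b0
  let b2 := (PySem.List.pyRange 1 (k+1) 1).foldl (fun b i =>
      (PySem.List.pyRange 1 (n+1) 1).foldl (fun b j =>
        let ssum := (PySem.List.pyRange 1 (j+1) 1).foldl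
            (fun s line => s + ((b.getD (i-1).toNat []).getD line.toNat 0)) 0
        pvSet2 b i j ssum) b) b1
  (b2.getD k.toNat []).getD n.toNat 0

-- ===== PORT B =====
def solve_alt (k : Int) (n : Int) : Int :=
  let row0 := PySem.List.pyRange 0 (n+1) 1
  let row := (PySem.List.pyRange 0 k 1).foldl (fun row _ =>
    (PySem.List.pyRange 1 (n+1) 1).foldl (fun row j =>
      row.set j.toNat (row.getD j.toNat 0 + row.getD (j-1).toNat 0)) row) row0
  row.getD n.toNat 0

-- ===== PRECONDITION & SPEC =====
-- Pre_ excludes exactly the inputs where the Python A raises IndexError (k < 0 or n < 0).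
def Pre_solve (k : Int) (n : Int) : Prop := 0 ≤ k ∧ 0 ≤ n
instance (k : Int) (n : Int) : Decidable (Pre_solve k n) := by unfold Pre_solve; infer_instance
def pvWitness_solve : Int × Int := (2, 3)

def Spec_solve (k : Int) (n : Int) (out : Int) : Prop := out = solve_alt k n
instance (k : Int) (n : Int) (out : Int) : Decidable (Spec_solve k n out) := by unfold Spec_solve; infer_instance

-- ===== CLAIM (what is proved, stated in full; the proofs are below) =====
def Claim_equal_solve : Prop := ∀ (k : Int) (n : Int), Dom_solve k n → Pre_solve k n → Spec_solve k n (solve k n)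

-- ===== LEMMAS AND PROOFS =====

-- The common mathematical value: pvF i j = residents on floor i in room j.
def pvF : Nat → Nat → Int
  | 0, j => (j : Int)
  | _+1, 0 => 0
  | i+1, j+1 => pvF (i+1) j + pvF i (j+1)

theorem pv_getD_set_self {α : Type} (l : List α) (i : Nat) (v d : α) (h : i < l.length) :
    (l.set i v).getD i d = v := by
  simp [List.getD_eq_getElem?_getD, h]

theorem pv_getD_set_ne {α : Type} (l : List α) (i j : Nat) (v d : α) (h : i ≠ j) :
    (l.set i v).getD j d = l.getD j d := by
  simp [List.getD_eq_getElem?_getD, List.getElem?_set_ne h]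


theorem pvF_zero (t : Nat) : pvF t 0 = 0 := by cases t <;> simp [pvF]

-- ---- B side ----

-- one in-place prefix-sum pass over columns 1..m turns a pvF-t row into a pvF-(t+1) row up to m
theorem pvB_pass (N t : Nat) : ∀ (m : Nat), m ≤ N → ∀ (row : List Int), row.length = N + 1 →
    (∀ j, j ≤ N → row.getD j 0 = pvF t j) →
    ((PySem.List.pyRange 1 ((m : Int) + 1) 1).foldl (fun row j =>
        row.set j.toNat (row.getD j.toNat 0 + row.getD (j - 1).toNat 0)) row).length = N + 1 ∧
    ∀ j, j ≤ N → ((PySem.List.pyRange 1 ((m : Int) + 1) 1).foldl (fun row j =>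
        row.set j.toNat (row.getD j.toNat 0 + row.getD (j - 1).toNat 0)) row).getD j 0 =
      if j ≤ m then pvF (t + 1) j else pvF t j := by
  intro m
  induction m with
  | zero =>
    intro _ row hlen hrow
    rw [show ((0 : Nat) : Int) + 1 = 1 by norm_num, PySem.List.pyRange_one_eq_nil (by norm_num)]
    simp only [List.foldl_nil]
    refine ⟨hlen, ?_⟩
    intro j hj
    by_cases h0 : j = 0
    · subst h0
      rw [if_pos (Nat.le_refl 0), pvF_zero, hrow 0 (Nat.zero_le _), pvF_zero]
    · rw [if_neg (by omega)]
      exact hrow j hj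
  | succ m ih =>
    intro hm row hlen hrow
    have hcast : ((m + 1 : Nat) : Int) + 1 = ((m : Int) + 1) + 1 := by push_cast; ring
    rw [hcast, PySem.List.pyRange_one_succ_right (by omega), List.foldl_append]
    obtain ⟨ihlen, ihget⟩ := ih (by omega) row hlen hrow
    set row' := (PySem.List.pyRange 1 ((m : Int) + 1) 1).foldl (fun row j =>
        row.set j.toNat (row.getD j.toNat 0 + row.getD (j - 1).toNat 0)) row with hrow'
    simp only [List.foldl_cons, List.foldl_nil]
    have ht1 : ((m : Int) + 1).toNat = m + 1 := by omega
    have ht2 : (((m : Int) + 1) - 1).toNat = m := by omega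
    rw [ht1, ht2]
    have hv1 : row'.getD (m + 1) 0 = pvF t (m + 1) := by
      have := ihget (m + 1) hm; simpa [Nat.lt_irrefl, (by omega : ¬ (m + 1 ≤ m))] using this
    have hv2 : row'.getD m 0 = pvF (t + 1) m := by
      have := ihget m (by omega); simpa using this
    rw [hv1, hv2]
    have hvv : pvF t (m + 1) + pvF (t + 1) m = pvF (t + 1) (m + 1) := by
      rw [pvF]; ring
    rw [hvv]
    refine ⟨by simp [ihlen], ?_⟩
    intro j hj
    by_cases hje : j = m + 1
    · subst hje
      rw [pv_getD_set_self _ _ _ _ (by omega), if_pos (Nat.le_refl _)]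
    · rw [pv_getD_set_ne _ _ _ _ _ (by omega), ihget j hj]
      by_cases hjm : j ≤ m
      · rw [if_pos hjm, if_pos (by omega)]
      · rw [if_neg hjm, if_neg (by omega)]

-- k passes starting from [0,1,...,N] produce the pvF-k row
theorem pvB_outer (N : Nat) : ∀ (t : Nat),
    ((PySem.List.pyRange 0 (t : Int) 1).foldl (fun row _ =>
        (PySem.List.pyRange 1 ((N : Int) + 1) 1).foldl (fun row j =>
          row.set j.toNat (row.getD j.toNat 0 + row.getD (j - 1).toNat 0)) row)
      (PySem.List.pyRange 0 ((N : Int) + 1) 1)).length = N + 1 ∧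
    ∀ j, j ≤ N → ((PySem.List.pyRange 0 (t : Int) 1).foldl (fun row _ =>
        (PySem.List.pyRange 1 ((N : Int) + 1) 1).foldl (fun row j =>
          row.set j.toNat (row.getD j.toNat 0 + row.getD (j - 1).toNat 0)) row)
      (PySem.List.pyRange 0 ((N : Int) + 1) 1)).getD j 0 = pvF t j := by
  intro t
  induction t with
  | zero =>
    simp only [show PySem.List.pyRange 0 (((0 : Nat)) : Int) 1 = [] from
      PySem.List.pyRange_one_eq_nil (by norm_num), List.foldl_nil]
    constructor
    · rw [PySem.List.length_pyRange_one]; omega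
    · intro j hj
      have hjlt : j < (PySem.List.pyRange 0 ((N : Int) + 1) 1).length := by
        rw [PySem.List.length_pyRange_one]; omega
      rw [List.getD_eq_getElem _ _ hjlt, PySem.List.getElem_pyRange_one]
      simp [pvF]
  | succ t ih =>
    have hsplit : PySem.List.pyRange 0 (((t + 1 : Nat)) : Int) 1 =
        PySem.List.pyRange 0 ((t : Nat) : Int) 1 ++ [((t : Nat) : Int)] := by
      rw [show (((t + 1 : Nat)) : Int) = ((t : Nat) : Int) + 1 by push_cast; ring]
      exact PySem.List.pyRange_one_succ_right (by omega)
    rw [hsplit, List.foldl_append]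
    obtain ⟨ihlen, ihget⟩ := ih
    simp only [List.foldl_cons, List.foldl_nil]
    obtain ⟨h1, h2⟩ := pvB_pass N t N (le_refl N) _ ihlen ihget
    refine ⟨h1, ?_⟩
    intro j hj
    have := h2 j hj
    simpa [hj] using this

theorem pvB_eq (K N : Nat) : solve_alt (K : Int) (N : Int) = pvF K N := by
  unfold solve_alt
  obtain ⟨hlen, hget⟩ := pvB_outer N K
  simp only []
  rw [show ((N : Int)).toNat = N by omega]
  exact hget N (le_refl N)

-- ---- A side ----

-- the innermost loop: summing entries 1..j of the pvF-t row gives pvF (t+1) j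
theorem pvA_ssum (N t : Nat) : ∀ (j : Nat), j ≤ N → ∀ (prev : List Int),
    (∀ l, l ≤ N → prev.getD l 0 = pvF t l) →
    (PySem.List.pyRange 1 ((j : Int) + 1) 1).foldl
        (fun s line => s + prev.getD line.toNat 0) 0 = pvF (t + 1) j := by
  intro j
  induction j with
  | zero =>
    intro _ prev _
    rw [PySem.List.pyRange_one_eq_nil (by norm_num)]
    simp [pvF_zero]
  | succ j ih =>
    intro hj prev hprev
    rw [show ((j + 1 : Nat) : Int) + 1 = ((j : Int) + 1) + 1 by push_cast; ring,
        PySem.List.pyRange_one_succ_right (by omega), List.foldl_append]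
    simp only [List.foldl_cons, List.foldl_nil]
    rw [ih (by omega) prev hprev, show ((j : Int) + 1).toNat = j + 1 by omega,
        hprev (j + 1) hj]
    rw [pvF]

-- filling row t+1 of the board: columns 1..m get pvF (t+1); everything else is untouched
theorem pvA_fill (K N t : Nat) (htK : t + 1 ≤ K) : ∀ (m : Nat), m ≤ N →
    ∀ (b : List (List Int)), b.length = K + 1 →
    (b.getD (t + 1) []).length = N + 1 →
    (∀ l, l ≤ N → (b.getD t []).getD l 0 = pvF t l) →
    ((PySem.List.pyRange 1 ((m : Int) + 1) 1).foldl (fun b j =>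
        pvSet2 b ((t : Int) + 1) j ((PySem.List.pyRange 1 (j + 1) 1).foldl
          (fun s line => s + ((b.getD (((t : Int) + 1) - 1).toNat []).getD line.toNat 0)) 0)) b).length = K + 1 ∧
    (∀ r, r ≠ t + 1 → ((PySem.List.pyRange 1 ((m : Int) + 1) 1).foldl (fun b j =>
        pvSet2 b ((t : Int) + 1) j ((PySem.List.pyRange 1 (j + 1) 1).foldl
          (fun s line => s + ((b.getD (((t : Int) + 1) - 1).toNat []).getD line.toNat 0)) 0)) b).getD r [] = b.getD r []) ∧
    (((PySem.List.pyRange 1 ((m : Int) + 1) 1).foldl (fun b j =>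
        pvSet2 b ((t : Int) + 1) j ((PySem.List.pyRange 1 (j + 1) 1).foldl
          (fun s line => s + ((b.getD (((t : Int) + 1) - 1).toNat []).getD line.toNat 0)) 0)) b).getD (t + 1) []).length = N + 1 ∧
    (∀ j, j ≤ N → (((PySem.List.pyRange 1 ((m : Int) + 1) 1).foldl (fun b j =>
        pvSet2 b ((t : Int) + 1) j ((PySem.List.pyRange 1 (j + 1) 1).foldl
          (fun s line => s + ((b.getD (((t : Int) + 1) - 1).toNat []).getD line.toNat 0)) 0)) b).getD (t + 1) []).getD j 0 =
      if 1 ≤ j ∧ j ≤ m then pvF (t + 1) j else (b.getD (t + 1) []).getD j 0) := by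
  intro m
  induction m with
  | zero =>
    intro _ b hlen hrowlen hprev
    rw [show PySem.List.pyRange 1 (((0 : Nat) : Int) + 1) 1 = [] from
      PySem.List.pyRange_one_eq_nil (by norm_num)]
    simp only [List.foldl_nil]
    refine ⟨hlen, by simp, hrowlen, ?_⟩
    intro j hj
    rw [if_neg (by omega)]
  | succ m ih =>
    intro hm b hlen hrowlen hprev
    rw [show PySem.List.pyRange 1 (((m + 1 : Nat) : Int) + 1) 1 =
          PySem.List.pyRange 1 ((m : Int) + 1) 1 ++ [(m : Int) + 1] by
        rw [show ((m + 1 : Nat) : Int) + 1 = ((m : Int) + 1) + 1 by push_cast; ring]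
        exact PySem.List.pyRange_one_succ_right (by omega), List.foldl_append]
    obtain ⟨ih1, ih2, ih3, ih4⟩ := ih (by omega) b hlen hrowlen hprev
    set b1 := (PySem.List.pyRange 1 ((m : Int) + 1) 1).foldl (fun b j =>
        pvSet2 b ((t : Int) + 1) j ((PySem.List.pyRange 1 (j + 1) 1).foldl
          (fun s line => s + ((b.getD (((t : Int) + 1) - 1).toNat []).getD line.toNat 0)) 0)) b
      with hb1
    simp only [List.foldl_cons, List.foldl_nil]
    have hidx : (((t : Int) + 1) - 1).toNat = t := by omega
    have hprev1 : ∀ l, l ≤ N → (b1.getD t []).getD l 0 = pvF t l := by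
      intro l hl; rw [ih2 t (by omega)]; exact hprev l hl
    have hsum : (PySem.List.pyRange 1 (((m : Int) + 1) + 1) 1).foldl
        (fun s line => s + ((b1.getD (((t : Int) + 1) - 1).toNat []).getD line.toNat 0)) 0 =
        pvF (t + 1) (m + 1) := by
      have h := pvA_ssum N t (m + 1) hm (b1.getD t []) hprev1
      rw [show ((m + 1 : Nat) : Int) + 1 = ((m : Int) + 1) + 1 by push_cast; ring] at h
      rw [hidx]
      exact h
    rw [hsum]
    unfold pvSet2
    rw [show ((t : Int) + 1).toNat = t + 1 by omega,
        show ((m : Int) + 1).toNat = m + 1 by omega]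
    have hb1len : b1.length = K + 1 := ih1
    refine ⟨by simp [hb1len], ?_, ?_, ?_⟩
    · intro r hr
      rw [pv_getD_set_ne _ _ _ _ _ (fun h => hr h.symm)]
      exact ih2 r hr
    · rw [pv_getD_set_self _ _ _ _ (by omega), List.length_set]
      exact ih3
    · intro j hj
      rw [pv_getD_set_self _ _ _ _ (by omega)]
      by_cases hje : j = m + 1
      · subst hje
        rw [pv_getD_set_self _ _ _ _ (by omega), if_pos (by omega)]
      · rw [pv_getD_set_ne _ _ _ _ _ (by omega), ih4 j hj]
        by_cases hjm : 1 ≤ j ∧ j ≤ m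
        · rw [if_pos hjm, if_pos (by omega)]
        · rw [if_neg hjm, if_neg (by omega)]

-- the init loop writes 0..m-1 into row 0; other rows stay all-zero
theorem pvA_init (K N : Nat) : ∀ (m : Nat), m ≤ N + 1 →
    ((PySem.List.pyRange 0 ((m : Int)) 1).foldl (fun b i => pvSet2 b 0 i i)
      ((PySem.List.pyRange 0 ((K : Int) + 1) 1).map (fun _ => List.replicate (N + 1) 0))).length = K + 1 ∧
    (∀ r, 1 ≤ r → r ≤ K → ((PySem.List.pyRange 0 ((m : Int)) 1).foldl (fun b i => pvSet2 b 0 i i)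
      ((PySem.List.pyRange 0 ((K : Int) + 1) 1).map (fun _ => List.replicate (N + 1) 0))).getD r [] = List.replicate (N + 1) 0) ∧
    (((PySem.List.pyRange 0 ((m : Int)) 1).foldl (fun b i => pvSet2 b 0 i i)
      ((PySem.List.pyRange 0 ((K : Int) + 1) 1).map (fun _ => List.replicate (N + 1) 0))).getD 0 []).length = N + 1 ∧
    (∀ l, l ≤ N → (((PySem.List.pyRange 0 ((m : Int)) 1).foldl (fun b i => pvSet2 b 0 i i)
      ((PySem.List.pyRange 0 ((K : Int) + 1) 1).map (fun _ => List.replicate (N + 1) 0))).getD 0 []).getD l 0 = if l < m then (l : Int) else 0) := by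
  intro m
  induction m with
  | zero =>
    intro _
    rw [show PySem.List.pyRange 0 (((0 : Nat) : Int)) 1 = [] from
      PySem.List.pyRange_one_eq_nil (by norm_num)]
    simp only [List.foldl_nil]
    have hlen : ((PySem.List.pyRange 0 ((K : Int) + 1) 1).map
        (fun _ => List.replicate (N + 1) (0 : Int))).length = K + 1 := by
      rw [List.length_map, PySem.List.length_pyRange_one]; omega
    have hrow : ∀ r, r ≤ K → ((PySem.List.pyRange 0 ((K : Int) + 1) 1).map
        (fun _ => List.replicate (N + 1) (0 : Int))).getD r [] = List.replicate (N + 1) 0 := by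
      intro r hr
      rw [List.getD_eq_getElem _ _ (by rw [hlen]; omega), List.getElem_map]
    refine ⟨hlen, fun r _ hr => hrow r hr, ?_, ?_⟩
    · rw [hrow 0 (Nat.zero_le _), List.length_replicate]
    · intro l hl
      rw [hrow 0 (Nat.zero_le _), if_neg (by omega),
          List.getD_eq_getElem _ _ (by rw [List.length_replicate]; omega),
          List.getElem_replicate]
  | succ m ih =>
    intro hm
    rw [show PySem.List.pyRange 0 (((m + 1 : Nat) : Int)) 1 =
          PySem.List.pyRange 0 ((m : Int)) 1 ++ [(m : Int)] by
        rw [show ((m + 1 : Nat) : Int) = ((m : Int)) + 1 by push_cast; ring]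
        exact PySem.List.pyRange_one_succ_right (by omega), List.foldl_append]
    obtain ⟨ih1, ih2, ih3, ih4⟩ := ih (by omega)
    set b1 := (PySem.List.pyRange 0 ((m : Int)) 1).foldl (fun b i => pvSet2 b 0 i i)
      ((PySem.List.pyRange 0 ((K : Int) + 1) 1).map (fun _ => List.replicate (N + 1) 0))
      with hb1
    simp only [List.foldl_cons, List.foldl_nil]
    unfold pvSet2
    rw [show ((0 : Int)).toNat = 0 from rfl, show ((m : Int)).toNat = m by omega]
    refine ⟨by simp [ih1], ?_, ?_, ?_⟩
    · intro r hr1 hr2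
      rw [pv_getD_set_ne _ _ _ _ _ (by omega)]
      exact ih2 r hr1 hr2
    · rw [pv_getD_set_self _ _ _ _ (by omega), List.length_set]
      exact ih3
    · intro l hl
      rw [pv_getD_set_self _ _ _ _ (by omega)]
      by_cases hle : l = m
      · subst hle
        rw [pv_getD_set_self _ _ _ _ (by omega), if_pos (by omega)]
      · rw [pv_getD_set_ne _ _ _ _ _ (by omega), ih4 l hl]
        by_cases hlm : l < m
        · rw [if_pos hlm, if_pos (by omega)]
        · rw [if_neg hlm, if_neg (by omega)]

-- the outer loop: after t iterations row t holds pvF t and the rows above are still all-zero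
theorem pvA_outer (K N : Nat) : ∀ (t : Nat), t ≤ K → ∀ (b : List (List Int)),
    b.length = K + 1 →
    (b.getD 0 []).length = N + 1 →
    (∀ l, l ≤ N → (b.getD 0 []).getD l 0 = pvF 0 l) →
    (∀ r, 1 ≤ r → r ≤ K → b.getD r [] = List.replicate (N + 1) 0) →
    ((PySem.List.pyRange 1 ((t : Int) + 1) 1).foldl (fun b i =>
        (PySem.List.pyRange 1 ((N : Int) + 1) 1).foldl (fun b j =>
          pvSet2 b i j ((PySem.List.pyRange 1 (j + 1) 1).foldl
            (fun s line => s + ((b.getD (i - 1).toNat []).getD line.toNat 0)) 0)) b) b).length = K + 1 ∧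
    (((PySem.List.pyRange 1 ((t : Int) + 1) 1).foldl (fun b i =>
        (PySem.List.pyRange 1 ((N : Int) + 1) 1).foldl (fun b j =>
          pvSet2 b i j ((PySem.List.pyRange 1 (j + 1) 1).foldl
            (fun s line => s + ((b.getD (i - 1).toNat []).getD line.toNat 0)) 0)) b) b).getD t []).length = N + 1 ∧
    (∀ l, l ≤ N → (((PySem.List.pyRange 1 ((t : Int) + 1) 1).foldl (fun b i =>
        (PySem.List.pyRange 1 ((N : Int) + 1) 1).foldl (fun b j =>
          pvSet2 b i j ((PySem.List.pyRange 1 (j + 1) 1).foldl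
            (fun s line => s + ((b.getD (i - 1).toNat []).getD line.toNat 0)) 0)) b) b).getD t []).getD l 0 = pvF t l) ∧
    (∀ r, t + 1 ≤ r → r ≤ K → ((PySem.List.pyRange 1 ((t : Int) + 1) 1).foldl (fun b i =>
        (PySem.List.pyRange 1 ((N : Int) + 1) 1).foldl (fun b j =>
          pvSet2 b i j ((PySem.List.pyRange 1 (j + 1) 1).foldl
            (fun s line => s + ((b.getD (i - 1).toNat []).getD line.toNat 0)) 0)) b) b).getD r [] = List.replicate (N + 1) 0) := by
  intro t
  induction t with
  | zero =>
    intro _ b hlen hr0len hr0 hrep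
    rw [show PySem.List.pyRange 1 (((0 : Nat) : Int) + 1) 1 = [] from
      PySem.List.pyRange_one_eq_nil (by norm_num)]
    simp only [List.foldl_nil]
    exact ⟨hlen, hr0len, hr0, hrep⟩
  | succ t ih =>
    intro htK b hlen hr0len hr0 hrep
    rw [show PySem.List.pyRange 1 (((t + 1 : Nat) : Int) + 1) 1 =
          PySem.List.pyRange 1 ((t : Int) + 1) 1 ++ [(t : Int) + 1] by
        rw [show ((t + 1 : Nat) : Int) + 1 = ((t : Int) + 1) + 1 by push_cast; ring]
        exact PySem.List.pyRange_one_succ_right (by omega), List.foldl_append]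
    obtain ⟨ih1, ih2, ih3, ih4⟩ := ih (by omega) b hlen hr0len hr0 hrep
    set b1 := (PySem.List.pyRange 1 ((t : Int) + 1) 1).foldl (fun b i =>
        (PySem.List.pyRange 1 ((N : Int) + 1) 1).foldl (fun b j =>
          pvSet2 b i j ((PySem.List.pyRange 1 (j + 1) 1).foldl
            (fun s line => s + ((b.getD (i - 1).toNat []).getD line.toNat 0)) 0)) b) b
      with hb1
    simp only [List.foldl_cons, List.foldl_nil]
    have hrow : b1.getD (t + 1) [] = List.replicate (N + 1) 0 := ih4 (t + 1) (le_refl _) (by omega)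
    obtain ⟨f1, f2, f3, f4⟩ := pvA_fill K N t (by omega) N (le_refl N) b1 ih1
      (by rw [hrow, List.length_replicate]) ih3
    refine ⟨f1, f3, ?_, ?_⟩
    · intro l hl
      rw [f4 l hl]
      by_cases h0 : 1 ≤ l
      · rw [if_pos ⟨h0, hl⟩]
      · have : l = 0 := by omega
        subst this
        rw [if_neg (by omega), hrow,
            List.getD_eq_getElem _ _ (by rw [List.length_replicate]; omega),
            List.getElem_replicate, pvF_zero]
    · intro r hr1 hr2
      rw [f2 r (by omega)]
      exact ih4 r (by omega) hr2

theorem pvA_eq (K N : Nat) : solve (K : Int) (N : Int) = pvF K N := by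
  unfold solve
  rw [show ((N : Int) + 1).toNat = N + 1 by omega]
  have hinit := pvA_init K N (N + 1) (le_refl _)
  rw [show ((N + 1 : Nat) : Int) = ((N : Int)) + 1 by push_cast; ring] at hinit
  obtain ⟨i1, i2, i3, i4⟩ := hinit
  have hr0 : ∀ l, l ≤ N → ((((PySem.List.pyRange 0 ((N : Int) + 1) 1).foldl
      (fun b i => pvSet2 b 0 i i)
      ((PySem.List.pyRange 0 ((K : Int) + 1) 1).map
        (fun _ => List.replicate (N + 1) 0))).getD 0 []).getD l 0) = pvF 0 l := by
    intro l hl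
    rw [i4 l hl, if_pos (by omega)]
    simp [pvF]
  obtain ⟨o1, o2, o3, o4⟩ := pvA_outer K N K (le_refl K) _ i1 i3 hr0 i2
  rw [show ((K : Int)).toNat = K by omega, show ((N : Int)).toNat = N by omega]
  exact o3 N (le_refl N)

-- ===== VERDICT (by name: the statement is the Claim_ definition above) =====
theorem solve_spec : Claim_equal_solve := by
  intro k n _ hpre
  obtain ⟨hk, hn⟩ := hpre
  obtain ⟨K, rfl⟩ : ∃ K : Nat, k = (K : Int) := ⟨k.toNat, (Int.toNat_of_nonneg hk).symm⟩
  obtain ⟨N, rfl⟩ : ∃ N : Nat, n = (N : Int) := ⟨n.toNat, (Int.toNat_of_nonneg hn).symm⟩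
  unfold Spec_solve
  rw [pvA_eq, pvB_eq]
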